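-- pv_equiv track=rewrite | github.com/symaeng98/Algorithm | 프로그래머스/2023_카카오_블라인드_채용/표현 가능한 이진트리.py | solution
-- ===== SOURCE A (Python) =====
-- def check(s):
--     length = len(s)
--     if length == 1:
--         return True
--
--     mid = length // 2
--     if s[mid] == "0":
--         if "1" in s:
--             return False
--         return True
--
--     return check(s[:mid]) and check(s[mid+1:])
--
-- def solution(numbers):
--     answer = []
--     for number in numbers:
--         bi_num = bin(number)[2:]
--         length = len(bi_num)
--         for i in range(1, 50):
--             if length == 2**i-1:
--                 break
--             if length < 2**i-1:
--                 bi_num = "0"*((2**i-1)-length) + bi_num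
--                 break
--
--         if check(bi_num):
--             answer.append(1)
--         else:
--             answer.append(0)
--     return answer
-- ===== SOURCE B (Python) =====
-- def valid(s):
--     # iterative worklist version of the full-binary-tree check
--     stack = [s]
--     while stack:
--         seg = stack.pop()
--         if len(seg) <= 1:
--             continue
--         mid = len(seg) // 2
--         if seg[mid] == "0":
--             if "1" in seg:
--                 return False
--         else:
--             stack.append(seg[:mid])
--             stack.append(seg[mid + 1:])
--     return True
--
-- def pad(bi):
--     length = len(bi)
--     for i in range(1, 50):
--         if length == 2 ** i - 1:
--             break
--         if length < 2 ** i - 1: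
--             bi = "0" * ((2 ** i - 1) - length) + bi
--             break
--     return bi
--
-- def solution(numbers):
--     return [1 if valid(pad(bin(n)[2:])) else 0 for n in numbers]
-- ===== Notes on version B (the rewrite author's own statement) =====
-- stated objective: alternative
-- what changed: The recursive full-binary-tree validity check is replaced by an iterative worklist: a stack of string segments is popped and halved in a loop, with early False on the first invalid segment; the wrapper becomes a comprehension instead of an append loop.
import Mathlib
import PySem

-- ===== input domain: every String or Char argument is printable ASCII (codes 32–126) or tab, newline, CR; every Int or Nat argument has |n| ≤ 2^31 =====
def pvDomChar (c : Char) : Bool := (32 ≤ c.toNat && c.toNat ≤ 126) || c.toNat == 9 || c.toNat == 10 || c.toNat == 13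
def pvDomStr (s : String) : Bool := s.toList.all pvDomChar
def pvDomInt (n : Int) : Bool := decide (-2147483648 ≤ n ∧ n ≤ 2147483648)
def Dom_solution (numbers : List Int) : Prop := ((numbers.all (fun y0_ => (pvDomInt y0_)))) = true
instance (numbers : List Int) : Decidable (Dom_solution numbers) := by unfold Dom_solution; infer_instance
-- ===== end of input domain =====

-- B replaces A's recursive tree check by an iterative worklist over segments (same
-- validity condition, explicit stack instead of recursion); equal return values, no speed claim.

-- shared helper: the padding loop 'for i in range(1, 50): …' of both Pythons, step for step
-- (i ≥ 1, so the Nat subtractions 2^i - 1 and (2^i-1) - length are exact for Python's ints)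
def padLoop (length : Nat) (bi : List Char) : List Nat → List Char
  | [] => bi
  | i :: rest =>
    if length == 2 ^ i - 1 then bi
    else if length < 2 ^ i - 1 then List.replicate ((2 ^ i - 1) - length) '0' ++ bi
    else padLoop length bi rest

-- ===== PORT A =====
-- A's recursive check(s); mid = len(s)//2 is inlined as s.length / 2 (same value, used twice)
def checkA (s : List Char) : Bool :=
  if s.length == 1 then true
  else if s.length == 0 then true   -- Python raises IndexError (s[mid] on "") here; totality guard, unreachable from solution
  else if PySem.List.pyGetD s ((s.length / 2 : Nat) : Int) 'x' == '0' then   -- s[mid]; in range: 2 <= len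
    if PySem.Chars.isIn ['1'] s then false else true
  else
    checkA (PySem.List.slice s none (some ((s.length / 2 : Nat) : Int))) &&
    checkA (PySem.List.slice s (some ((s.length / 2 + 1 : Nat) : Int)) none)
termination_by s.length
decreasing_by
  · rw [PySem.List.slice_to_natCast]
    simp only [List.length_take, beq_iff_eq] at *; omega
  · rw [PySem.List.slice_from_natCast]
    simp only [List.length_drop, beq_iff_eq] at *; omega

def solution (numbers : List Int) : List Int :=
  numbers.foldl (fun answer number =>
    let bi_num := PySem.List.slice (PySem.Int.toBinChars0b number) (some 2) none  -- bin(number)[2:]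
    let bi_num2 := padLoop bi_num.length bi_num (List.range' 1 49)                -- the for-i padding loop
    if checkA bi_num2 then answer ++ [1] else answer ++ [0]) []

-- ===== PORT B =====
-- B's iterative worklist check (stack top = list head; left pushed before right, so right pops first);
-- mid = len(seg)//2 inlined as seg.length / 2
def validB (stack : List (List Char)) : Bool :=
  match stack with
  | [] => true
  | seg :: rest =>
    if seg.length <= 1 then validB rest
    else if PySem.List.pyGetD seg ((seg.length / 2 : Nat) : Int) 'x' == '0' then   -- seg[mid]; in range: 2 <= len
      if PySem.Chars.isIn ['1'] seg then false else validB rest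
    else
      validB (PySem.List.slice seg (some ((seg.length / 2 + 1 : Nat) : Int)) none ::
              PySem.List.slice seg none (some ((seg.length / 2 : Nat) : Int)) :: rest)
termination_by (stack.map (fun t => 2 * t.length + 1)).sum
decreasing_by
  · simp only [List.map_cons, List.sum_cons]; omega
  · simp only [List.map_cons, List.sum_cons]; omega
  · rw [PySem.List.slice_from_natCast, PySem.List.slice_to_natCast]
    simp only [List.map_cons, List.sum_cons, List.length_drop, List.length_take] at *
    omega

def padB (bi : List Char) : List Char := padLoop bi.length bi (List.range' 1 49)

def solution_alt (numbers : List Int) : List Int :=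
  numbers.map (fun n =>
    if validB [padB (PySem.List.slice (PySem.Int.toBinChars0b n) (some 2) none)] then 1 else 0)

-- ===== PRECONDITION & SPEC =====
def Spec_solution (numbers : List Int) (out : List Int) : Prop := out = solution_alt numbers
instance (numbers : List Int) (out : List Int) : Decidable (Spec_solution numbers out) := by unfold Spec_solution; infer_instance

-- ===== CLAIM (what is proved, stated in full; the proofs are below) =====
def Claim_equal_solution : Prop := ∀ (numbers : List Int), Dom_solution numbers → Spec_solution numbers (solution numbers)

-- ===== LEMMAS AND PROOFS =====

lemma checkA_short (s : List Char) (h : s.length ≤ 1) : checkA s = true := by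
  conv_lhs => rw [checkA]
  split
  · rfl
  · split
    · rfl
    · rename_i h1 h0
      simp only [beq_iff_eq] at h1 h0
      omega

lemma checkA_mid0 (seg : List Char) (h : 2 ≤ seg.length)
    (hc : (PySem.List.pyGetD seg ((seg.length / 2 : Nat) : Int) 'x' == '0') = true) :
    checkA seg = (if PySem.Chars.isIn ['1'] seg then false else true) := by
  conv_lhs => rw [checkA]
  rw [if_neg (by simp only [beq_iff_eq]; omega), if_neg (by simp only [beq_iff_eq]; omega), if_pos hc]

lemma checkA_split (seg : List Char) (h : 2 ≤ seg.length)
    (hc : ¬ (PySem.List.pyGetD seg ((seg.length / 2 : Nat) : Int) 'x' == '0') = true) :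
    checkA seg =
      (checkA (PySem.List.slice seg none (some ((seg.length / 2 : Nat) : Int))) &&
       checkA (PySem.List.slice seg (some ((seg.length / 2 + 1 : Nat) : Int)) none)) := by
  conv_lhs => rw [checkA]
  rw [if_neg (by simp only [beq_iff_eq]; omega), if_neg (by simp only [beq_iff_eq]; omega), if_neg hc]

lemma validB_eq_all (stack : List (List Char)) : validB stack = stack.all checkA := by
  induction stack using validB.induct with
  | case1 => simp [validB]
  | case2 seg rest h ih =>
    rw [validB, if_pos h]
    simp [ih, checkA_short seg h]
  | case3 seg rest h hc h1 =>
    rw [validB, if_neg h, if_pos hc, if_pos h1]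
    simp [checkA_mid0 seg (by omega) hc, h1]
  | case4 seg rest h hc h1 ih =>
    rw [validB, if_neg h, if_pos hc, if_neg h1]
    simp [ih, checkA_mid0 seg (by omega) hc, h1]
  | case5 seg rest h hc ih =>
    rw [validB, if_neg h, if_neg hc, ih]
    simp only [List.all_cons, checkA_split seg (by omega) hc]
    cases checkA (PySem.List.slice seg none (some ((seg.length / 2 : Nat) : Int))) <;>
      cases checkA (PySem.List.slice seg (some ((seg.length / 2 + 1 : Nat) : Int)) none) <;>
      simp

lemma validB_singleton (s : List Char) : validB [s] = checkA s := by
  simp [validB_eq_all]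

lemma solution_foldl (l : List Int) (acc : List Int) :
    l.foldl (fun answer number =>
      let bi_num := PySem.List.slice (PySem.Int.toBinChars0b number) (some 2) none
      let bi_num2 := padLoop bi_num.length bi_num (List.range' 1 49)
      if checkA bi_num2 then answer ++ [1] else answer ++ [0]) acc
    = acc ++ l.map (fun n =>
        if validB [padB (PySem.List.slice (PySem.Int.toBinChars0b n) (some 2) none)] then 1 else 0) := by
  induction l generalizing acc with
  | nil => simp
  | cons x xs ih =>
    simp only [List.foldl_cons, List.map_cons, ih, validB_singleton, padB]
    split <;> simp

-- ===== VERDICT (by name: the statement is the Claim_ definition above) =====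
theorem solution_spec : Claim_equal_solution := by
  intro numbers _
  show solution numbers = solution_alt numbers
  unfold solution solution_alt
  exact solution_foldl numbers []
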